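-- pv_equiv track=rewrite | github.com/eliottcassidy2000/math | 04-computation/anti_aut_involution_test.py | find_all_auts
-- ===== SOURCE A (Python) =====
-- from itertools import permutations
--
-- def find_all_auts(T):
--     n = len(T)
--     auts = []
--     for perm in permutations(range(n)):
--         ok = True
--         for i in range(n):
--             for j in range(n):
--                 if i != j and T[perm[i]][perm[j]] != T[i][j]:
--                     ok = False
--                     break
--             if not ok:
--                 break
--         if ok:
--             auts.append(perm)
--     return auts
-- ===== SOURCE B (Python) =====
-- def find_all_auts(T):
--     n = len(T)
--
--     def dfs(p, rem):
--         if not rem: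
--             return [tuple(p)]
--         out = []
--         k = len(p)
--         for idx, x in enumerate(rem):
--             if all(T[x][p[j]] == T[k][j] and T[p[j]][x] == T[j][k]
--                    for j in range(k)):
--                 out.extend(dfs(p + [x], rem[:idx] + rem[idx + 1:]))
--         return out
--
--     return dfs([], list(range(n)))
-- ===== Notes on version B (the rewrite author's own statement) =====
-- stated objective: faster
-- what changed: Instead of generating every permutation of range(n) and checking all n^2 pairs afterwards, B builds the permutation one image at a time by recursive backtracking, checking each new image against the already-assigned prefix and pruning inconsistent branches immediately; candidates are taken in increasing order so the surviving permutations come out in the same lexicographic order as itertools.permutations.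
import Mathlib
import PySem

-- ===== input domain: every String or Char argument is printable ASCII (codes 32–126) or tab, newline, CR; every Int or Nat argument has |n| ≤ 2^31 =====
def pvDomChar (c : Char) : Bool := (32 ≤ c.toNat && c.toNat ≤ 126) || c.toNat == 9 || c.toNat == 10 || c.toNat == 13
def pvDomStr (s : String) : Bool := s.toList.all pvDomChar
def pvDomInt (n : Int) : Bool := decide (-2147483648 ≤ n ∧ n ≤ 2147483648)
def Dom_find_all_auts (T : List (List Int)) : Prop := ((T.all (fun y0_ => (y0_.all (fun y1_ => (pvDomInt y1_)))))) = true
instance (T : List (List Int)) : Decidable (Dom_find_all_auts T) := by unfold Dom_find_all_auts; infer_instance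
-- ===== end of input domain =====

-- B replaces A's generate-every-permutation-then-check with lexicographic backtracking
-- (assign images one at a time, prune on the first inconsistent pair); return value only.

-- shared helper: the table read T[i][j]; under Pre_ every index either program reads is
-- in range, so getD is exact there
def lookupT (T : List (List Int)) (i j : Nat) : Int := (T.getD i []).getD j 0

-- ===== PORT A =====
-- A's inner double loop with its two breaks = short-circuiting all over i, j in range n
def chk (T : List (List Int)) (k : Nat) (q : List Nat) : Bool :=
  (List.range k).all fun i => (List.range k).all fun j =>
    i == j || lookupT T (q.getD i 0) (q.getD j 0) == lookupT T i j

-- itertools.permutations order: pick each element of l (in list order) as head, recurse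
def permsOf (l : List Nat) : List (List Nat) :=
  if _ : l = [] then [[]]
  else l.attach.flatMap fun ⟨x, hx⟩ => (permsOf (l.erase x)).map (x :: ·)
termination_by l.length
decreasing_by
  rw [List.length_erase_of_mem hx]
  have := List.length_pos_of_mem hx
  omega

def find_all_auts (T : List (List Int)) : List (List Int) :=
  ((permsOf (List.range T.length)).filter (chk T T.length)).map (fun q => q.map (Int.ofNat))

-- ===== PORT B =====
-- Source B's incremental consistency check of a new image x against the assigned prefix p
def consistentExt (T : List (List Int)) (p : List Nat) (x : Nat) : Bool :=
  (List.range p.length).all fun j =>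
    (lookupT T x (p.getD j 0) == lookupT T p.length j) &&
    (lookupT T (p.getD j 0) x == lookupT T j p.length)

-- Source B's dfs: extend prefix p by each remaining value (in increasing order), prune
def dfs (T : List (List Int)) (p rem : List Nat) : List (List Nat) :=
  if _ : rem = [] then [p]
  else rem.attach.flatMap fun ⟨x, hx⟩ =>
    if consistentExt T p x then dfs T (p ++ [x]) (rem.erase x) else []
termination_by rem.length
decreasing_by
  rw [List.length_erase_of_mem hx]
  have := List.length_pos_of_mem hx
  omega

def find_all_auts_alt (T : List (List Int)) : List (List Int) :=
  (dfs T [] (List.range T.length)).map (fun q => q.map (Int.ofNat))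

-- ===== PRECONDITION & SPEC =====
-- Pre_ excludes exactly the inputs on which Python A raises IndexError: both programs read
-- precisely the off-diagonal cells T[i][j] (i ≠ j < len(T)), so every such cell must exist.
def Pre_find_all_auts (T : List (List Int)) : Prop :=
  ∀ i < T.length, ∀ j < T.length, i ≠ j → j < (T.getD i []).length
instance (T : List (List Int)) : Decidable (Pre_find_all_auts T) := by unfold Pre_find_all_auts; infer_instance

def pvWitness_find_all_auts : List (List Int) := [[0, 1], [1, 0]]

def Spec_find_all_auts (T : List (List Int)) (out : List (List Int)) : Prop := out = find_all_auts_alt T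
instance (T : List (List Int)) (out : List (List Int)) : Decidable (Spec_find_all_auts T out) := by unfold Spec_find_all_auts; infer_instance

-- ===== CLAIM (what is proved, stated in full; the proofs are below) =====
def Claim_equal_find_all_auts : Prop := ∀ (T : List (List Int)), Dom_find_all_auts T → Pre_find_all_auts T → Spec_find_all_auts T (find_all_auts T)

-- ===== LEMMAS AND PROOFS =====

-- chk only looks at the first k entries of q
lemma chk_prefix (T : List (List Int)) (k : Nat) (p s : List Nat) (hk : k ≤ p.length) :
    chk T k (p ++ s) = chk T k p := by
  rw [Bool.eq_iff_iff]
  simp only [chk, List.all_eq_true, List.mem_range]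
  constructor <;> intro h i hi j hj
  · have := h i hi j hj
    rwa [List.getD_append _ _ _ _ (hi.trans_le hk), List.getD_append _ _ _ _ (hj.trans_le hk)] at this
  · have := h i hi j hj
    rwa [List.getD_append _ _ _ _ (hi.trans_le hk), List.getD_append _ _ _ _ (hj.trans_le hk)]

-- chk is antitone in the bound k
lemma chk_mono (T : List (List Int)) {k m : Nat} (q : List Nat) (hkm : k ≤ m)
    (h : chk T m q = true) : chk T k q = true := by
  simp only [chk, List.all_eq_true, List.mem_range] at h ⊢
  intro i hi j hj
  exact h i (hi.trans_le hkm) j (hj.trans_le hkm)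

-- the incremental check is exactly what chk gains when a consistent prefix grows by one
lemma chk_snoc (T : List (List Int)) (p : List Nat) (x : Nat) (hp : chk T p.length p = true) :
    chk T (p.length + 1) (p ++ [x]) = consistentExt T p x := by
  have gA : ∀ i < p.length, (p ++ [x]).getD i 0 = p.getD i 0 :=
    fun i hi => List.getD_append _ _ _ _ hi
  have gB : (p ++ [x]).getD p.length 0 = x := by
    rw [List.getD_append_right _ _ _ _ (le_refl _)]
    simp
  rw [Bool.eq_iff_iff]
  simp only [chk, consistentExt, List.all_eq_true, List.mem_range, Bool.or_eq_true,
    Bool.and_eq_true, beq_iff_eq] at hp ⊢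
  constructor
  · intro h j hj
    have h1 := h p.length (by omega) j (by omega)
    have h2 := h j (by omega) p.length (by omega)
    rw [gA j hj, gB] at h1 h2
    rcases h1 with h1 | h1
    · omega
    rcases h2 with h2 | h2
    · omega
    exact ⟨h1, h2⟩
  · intro h i hi j hj
    rcases Nat.lt_or_ge i p.length with hi' | hi'
    · rcases Nat.lt_or_ge j p.length with hj' | hj'
      · rw [gA i hi', gA j hj']
        exact hp i hi' j hj'
      · have : j = p.length := by omega
        subst this
        rw [gA i hi', gB]
        exact Or.inr (h i hi').2
    · have : i = p.length := by omega
      subst this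
      rcases Nat.lt_or_ge j p.length with hj' | hj'
      · rw [gA j hj', gB]
        exact Or.inr (h j hj').1
      · have : j = p.length := by omega
        subst this
        left; rfl

-- main invariant: from a consistent prefix p, dfs returns exactly the completions of p
-- that pass A's full check — A's filtered enumeration, restricted to this subtree
lemma dfs_eq_filter (T : List (List Int)) :
    ∀ (m : Nat) (rem p : List Nat), rem.length = m → chk T p.length p = true →
      dfs T p rem =
        ((permsOf rem).map (p ++ ·)).filter (chk T (p.length + rem.length)) := by
  intro m
  induction m with
  | zero =>
    intro rem p hlen hp
    have hrem : rem = [] := List.length_eq_zero_iff.mp hlen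
    subst hrem
    rw [dfs, permsOf]
    simp [hp]
  | succ m ih =>
    intro rem p hlen hp
    have hne : rem ≠ [] := by
      intro h; subst h; simp at hlen
    rw [dfs, dif_neg hne, permsOf, dif_neg hne, List.map_flatMap, List.filter_flatMap]
    apply List.flatMap_congr
    rintro ⟨x, hx⟩ -
    have hcomp : ((p ++ ·) ∘ (x :: ·)) = ((p ++ [x]) ++ ·) := by
      funext s; simp
    have hlen' : (rem.erase x).length = m := by
      rw [List.length_erase_of_mem hx]; omega
    have hsum : (p ++ [x]).length + (rem.erase x).length = p.length + rem.length := by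
      simp [hlen', List.length_append]; omega
    rw [List.map_map, hcomp]
    show (if consistentExt T p x = true then dfs T (p ++ [x]) (rem.erase x) else []) =
      List.filter (chk T (p.length + rem.length)) (List.map ((p ++ [x]) ++ ·) (permsOf (rem.erase x)))
    by_cases hc : consistentExt T p x = true
    · rw [if_pos hc]
      have hp' : chk T (p ++ [x]).length (p ++ [x]) = true := by
        rw [List.length_append]
        simpa [chk_snoc T p x hp] using hc
      rw [ih (rem.erase x) (p ++ [x]) hlen' hp', hsum]
    · rw [if_neg hc]
      have hf : chk T (p.length + 1) (p ++ [x]) = false := by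
        rw [chk_snoc T p x hp]
        exact Bool.not_eq_true _ ▸ (by simpa using hc)
      symm
      rw [List.filter_eq_nil_iff]
      intro q hq
      rcases List.mem_map.mp hq with ⟨s, -, rfl⟩
      intro hC
      have h1 : chk T (p.length + 1) ((p ++ [x]) ++ s) = true := by
        apply chk_mono T _ _ hC
        have : 1 ≤ rem.length := by omega
        omega
      rw [chk_prefix T (p.length + 1) (p ++ [x]) s (by simp)] at h1
      rw [hf] at h1
      exact Bool.false_ne_true h1

-- ===== VERDICT (by name: the statement is the Claim_ definition above) =====
theorem find_all_auts_spec : Claim_equal_find_all_auts := by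
  intro T _ _
  unfold Spec_find_all_auts find_all_auts find_all_auts_alt
  have h0 : chk T ([] : List Nat).length ([] : List Nat) = true := by
    simp [chk]
  rw [dfs_eq_filter T (List.range T.length).length (List.range T.length) [] rfl h0]
  simp [List.length_range]
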